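-- pv_equiv track=rewrite | github.com/Intelligence-Builder/Cloud-Optimizer | src/cloud_optimizer/tracing/middleware.py | _parse_trace_header
-- ===== SOURCE A (Python) =====
-- from typing import Callable, Optional
--
-- def _parse_trace_header(
--     header: Optional[str]
-- ) -> tuple[Optional[str], Optional[str], Optional[bool]]:
--     """Parse X-Ray trace header.
--
--     Format: Root=1-5759e988-bd862e3fe1be46a994272793;Parent=53995c3f42cd8ad8;Sampled=1
--
--     Args:
--         header: X-Ray trace header value
--
--     Returns:
--         Tuple of (trace_id, parent_id, sampled)
--     """
--     if not header:
--         return None, None, None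
--
--     trace_id = None
--     parent_id = None
--     sampled = None
--
--     parts = header.split(";")
--     for part in parts:
--         if "=" in part:
--             key, value = part.split("=", 1)
--             key = key.strip()
--             value = value.strip()
--
--             if key == "Root":
--                 trace_id = value
--             elif key == "Parent":
--                 parent_id = value
--             elif key == "Sampled":
--                 sampled = value == "1"
--
--     return trace_id, parent_id, sampled
-- ===== SOURCE B (Python) =====
-- from typing import Optional
--
--
-- def _parse_trace_header(
--     header: Optional[str]
-- ) -> tuple[Optional[str], Optional[str], Optional[bool]]:
--     """Parse X-Ray trace header: pair list once, then per-field reverse first-match."""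
--     if not header:
--         return None, None, None
--
--     pairs = [p.split("=", 1) for p in header.split(";") if "=" in p]
--
--     def last(key):
--         for k, v in reversed(pairs):
--             if k.strip() == key:
--                 return v.strip()
--         return None
--
--     sampled = last("Sampled")
--     return last("Root"), last("Parent"), None if sampled is None else sampled == "1"
-- ===== Notes on version B (the rewrite author's own statement) =====
-- stated objective: alternative
-- what changed: B replaces A's single forward pass updating three accumulator variables with staged passes: it materialises the key/value pair list once, then resolves each of the three fields independently by scanning the pairs in reverse and taking the first matching key (equivalent to last-wins).
import Mathlib
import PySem

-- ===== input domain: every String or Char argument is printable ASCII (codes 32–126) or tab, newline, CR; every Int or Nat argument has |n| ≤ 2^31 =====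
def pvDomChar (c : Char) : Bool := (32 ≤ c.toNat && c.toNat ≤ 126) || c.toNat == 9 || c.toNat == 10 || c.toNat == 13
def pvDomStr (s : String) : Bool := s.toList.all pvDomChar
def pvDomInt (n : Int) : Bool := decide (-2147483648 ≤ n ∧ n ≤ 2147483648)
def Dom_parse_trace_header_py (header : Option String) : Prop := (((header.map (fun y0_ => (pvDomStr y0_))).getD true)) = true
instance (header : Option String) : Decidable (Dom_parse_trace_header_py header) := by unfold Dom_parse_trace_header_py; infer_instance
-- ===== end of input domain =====

-- B replaces A's single forward pass over three accumulator variables by staged passes: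
-- build the key/value pair list once, then resolve each field by a reverse first-match
-- scan (objective: alternative decomposition, same cost).

-- ===== PORT A =====
-- one loop step of A: the if/elif chain updating the (trace_id, parent_id, sampled) triple
def pvAStep (acc : Option String × Option String × Option Bool) (part : String) :
    Option String × Option String × Option Bool :=
  if PySem.Str.isIn "=" part then
    match PySem.Str.splitMax? part "=" 1 with
    | some (k :: v :: _) =>
        let key := PySem.Str.strip k
        let value := PySem.Str.strip v
        if key = "Root" then (some value, acc.2.1, acc.2.2)
        else if key = "Parent" then (acc.1, some value, acc.2.2)
        else if key = "Sampled" then (acc.1, acc.2.1, some (value == "1"))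
        else acc
    | _ => acc  -- unreachable: sep "=" ≠ "" and "=" ∈ part give ≥ 2 pieces
  else acc

def parse_trace_header_py (header : Option String) : Option String × Option String × Option Bool :=
  match header with
  | none => (none, none, none)
  | some h =>
    if h = "" then (none, none, none)
    else ((PySem.Str.split? h ";").getD []).foldl pvAStep (none, none, none)

-- ===== PORT B =====
-- the pair comprehension: [p.split("=", 1) for p in header.split(";") if "=" in p]
def pvPair (part : String) : Option (String × String) :=
  if PySem.Str.isIn "=" part then
    match PySem.Str.splitMax? part "=" 1 with
    | some (k :: v :: _) => some (k, v)
    | _ => none  -- unreachable, as in pvAStep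
  else none

-- helper `last`: first match over the reversed pair list
def pvLast (pairs : List (String × String)) (key : String) : Option String :=
  (pairs.reverse.find? (fun kv => PySem.Str.strip kv.1 == key)).map
    (fun kv => PySem.Str.strip kv.2)

def parse_trace_header_py_alt (header : Option String) : Option String × Option String × Option Bool :=
  match header with
  | none => (none, none, none)
  | some h =>
    if h = "" then (none, none, none)
    else
      let pairs := ((PySem.Str.split? h ";").getD []).filterMap pvPair
      let sampled := pvLast pairs "Sampled"
      (pvLast pairs "Root", pvLast pairs "Parent",
        match sampled with | none => none | some s => some (s == "1"))

-- ===== PRECONDITION & SPEC =====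
def Spec_parse_trace_header_py (header : Option String) (out : Option String × Option String × Option Bool) : Prop := out = parse_trace_header_py_alt header
instance (header : Option String) (out : Option String × Option String × Option Bool) : Decidable (Spec_parse_trace_header_py header out) := by unfold Spec_parse_trace_header_py; infer_instance

-- ===== CLAIM (what is proved, stated in full; the proofs are below) =====
def Claim_equal_parse_trace_header_py : Prop := ∀ (header : Option String), Dom_parse_trace_header_py header → Spec_parse_trace_header_py header (parse_trace_header_py header)

-- ===== LEMMAS AND PROOFS =====

-- the contribution of a single part to field `key`
def pvG (key : String) (part : String) : Option String :=
  match pvPair part with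
  | none => none
  | some (k, v) => if PySem.Str.strip k = key then some (PySem.Str.strip v) else none

theorem pvLast_cons (p : String) (ps : List String) (key : String) :
    pvLast ((p :: ps).filterMap pvPair) key =
      (pvLast (ps.filterMap pvPair) key).or (pvG key p) := by
  unfold pvLast pvG
  rcases hp : pvPair p with _ | ⟨k, v⟩
  · simp [hp]
  · simp only [List.filterMap_cons, hp, List.reverse_cons, List.find?_append]
    rcases hf : (List.filterMap pvPair ps).reverse.find? (fun kv => PySem.Str.strip kv.1 == key) with _ | kv
    · simp only [hf, List.find?, Option.none_or]
      by_cases hk : PySem.Str.strip k = key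
      · simp [hk]
      · simp [hk, beq_eq_false_iff_ne.mpr hk]
    · simp [hf, Option.some_or]

theorem pvAStep_eq (acc : Option String × Option String × Option Bool) (p : String) :
    pvAStep acc p =
      ((pvG "Root" p).or acc.1, (pvG "Parent" p).or acc.2.1,
        ((pvG "Sampled" p).map (fun v => v == "1")).or acc.2.2) := by
  unfold pvAStep pvG pvPair
  by_cases h : PySem.Str.isIn "=" p
  · simp only [h, if_true]
    rcases hs : PySem.Str.splitMax? p "=" 1 with _ | ⟨_ | ⟨k, _ | ⟨v, rest⟩⟩⟩
    · simp [Option.none_or]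
    · simp [Option.none_or]
    · simp [Option.none_or]
    · simp only
      by_cases hR : PySem.Str.strip k = "Root"
      · simp [hR, Option.some_or, Option.none_or]
      · by_cases hP : PySem.Str.strip k = "Parent"
        · simp [hP, Option.some_or, Option.none_or]
        · by_cases hS : PySem.Str.strip k = "Sampled"
          · simp [hS, Option.none_or]
          · simp [hR, hP, hS, Option.none_or]
  · simp only [if_neg h]; rfl

theorem pvFold_eq (parts : List String) (acc : Option String × Option String × Option Bool) :
    parts.foldl pvAStep acc =
      ((pvLast (parts.filterMap pvPair) "Root").or acc.1,
       (pvLast (parts.filterMap pvPair) "Parent").or acc.2.1,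
       ((pvLast (parts.filterMap pvPair) "Sampled").map (fun v => v == "1")).or acc.2.2) := by
  induction parts generalizing acc with
  | nil => simp [pvLast, Option.none_or]
  | cons p ps ih =>
    simp only [List.foldl_cons, ih, pvAStep_eq, pvLast_cons]
    refine Prod.ext ?_ (Prod.ext ?_ ?_) <;> simp only
    · exact Option.or_assoc.symm
    · exact Option.or_assoc.symm
    · rcases pvLast (ps.filterMap pvPair) "Sampled" with _ | s <;>
        rcases hg : pvG "Sampled" p with _ | g <;> simp

-- ===== VERDICT (by name: the statement is the Claim_ definition above) =====
theorem parse_trace_header_py_spec : Claim_equal_parse_trace_header_py := by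
  unfold Claim_equal_parse_trace_header_py Spec_parse_trace_header_py
  intro header _
  unfold parse_trace_header_py parse_trace_header_py_alt
  match header with
  | none => rfl
  | some h =>
    by_cases he : h = ""
    · simp [he]
    · simp only [he, if_false, pvFold_eq]
      rcases pvLast (((PySem.Str.split? h ";").getD []).filterMap pvPair) "Sampled" with _ | s <;> simp
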